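-- pv_equiv track=rewrite | github.com/themrsung/algorithms | 프로그래머스/lv0/120861. 캐릭터의 좌표/캐릭터의 좌표.py | solution
-- ===== SOURCE A (Python) =====
-- import math
--
-- def solution(key_input, board):
--     x_delta = 0
--     y_delta = 0
--
--     x_max = math.floor(board[0] / 2)
--     x_min = math.ceil(board[0] / 2 * -1)
--
--     y_max = math.floor(board[1] / 2)
--     y_min = math.ceil(board[1] / 2 * -1)
--
--     for input in key_input:
--         if input == "up":
--             y_delta = min(
--                 y_max,
--                 max(
--                     y_min,
--                     y_delta + 1
--                 )
--             )
--         elif input == "right":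
--             x_delta = min(
--                 x_max,
--                 max(
--                     x_min,
--                     x_delta + 1
--                 )
--             )
--         elif input == "down":
--             y_delta = min(
--                 y_max,
--                 max(
--                     y_min,
--                     y_delta - 1
--                 )
--             )
--         elif input == "left":
--             x_delta = min(
--                 x_max,
--                 max(
--                     x_min,
--                     x_delta - 1
--                 )
--             )
--
--     return [x_delta, y_delta]
-- ===== SOURCE B (Python) =====
-- import math
--
-- def solution(key_input, board):
--     # Horizontal and vertical motion are independent: one clamp helper,
--     # one pass per axis over the commands.
--     def clamp(lo, hi, v):
--         return min(hi, max(lo, v))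
--
--     x_max = math.floor(board[0] / 2)
--     x_min = math.ceil(board[0] / 2 * -1)
--     y_max = math.floor(board[1] / 2)
--     y_min = math.ceil(board[1] / 2 * -1)
--
--     x = 0
--     for k in key_input:
--         if k == "right":
--             x = clamp(x_min, x_max, x + 1)
--         elif k == "left":
--             x = clamp(x_min, x_max, x - 1)
--
--     y = 0
--     for k in key_input:
--         if k == "up":
--             y = clamp(y_min, y_max, y + 1)
--         elif k == "down":
--             y = clamp(y_min, y_max, y - 1)
--
--     return [x, y]
-- ===== Notes on version B (the rewrite author's own statement) =====
-- stated objective: simpler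
-- what changed: Replaces the single loop with four-way branching on a shared (x,y) state by a clamp helper and two independent per-axis passes over the commands.
import Mathlib
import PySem

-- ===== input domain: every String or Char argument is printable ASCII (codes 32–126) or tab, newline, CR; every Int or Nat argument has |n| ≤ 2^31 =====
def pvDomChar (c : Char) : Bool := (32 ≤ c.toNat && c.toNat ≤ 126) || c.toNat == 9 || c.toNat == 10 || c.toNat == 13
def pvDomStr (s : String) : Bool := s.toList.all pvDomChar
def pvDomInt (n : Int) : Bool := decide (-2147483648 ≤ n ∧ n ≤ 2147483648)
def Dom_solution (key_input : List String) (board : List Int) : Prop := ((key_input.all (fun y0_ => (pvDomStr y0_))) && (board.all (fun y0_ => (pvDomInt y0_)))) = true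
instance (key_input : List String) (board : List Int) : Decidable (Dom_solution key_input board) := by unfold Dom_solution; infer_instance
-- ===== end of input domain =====

-- B: two independent per-axis passes with a clamp helper instead of A's four-way branch on a shared (x,y) state; return value only.

-- ===== PORT A =====
-- math.floor(board[0] / 2) and math.ceil(board[0] / 2 * -1): on Dom (|n| ≤ 2^31 < 2^53) the
-- float division is exact, so these are exactly floordiv n 2 and -(floordiv n 2).
-- board[0]/board[1] raise IndexError when board is too short; Pre_solution excludes that,
-- the default 0 of pyGetD is never used inside Pre_.
def pvStepA (x_max x_min y_max y_min : Int) (p : Int × Int) (k : String) : Int × Int :=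
  if k = "up" then (p.1, min y_max (max y_min (p.2 + 1)))
  else if k = "right" then (min x_max (max x_min (p.1 + 1)), p.2)
  else if k = "down" then (p.1, min y_max (max y_min (p.2 - 1)))
  else if k = "left" then (min x_max (max x_min (p.1 - 1)), p.2)
  else p

def solution (key_input : List String) (board : List Int) : List Int :=
  let x_max := PySem.Int.floordiv (PySem.List.pyGetD board 0 0) 2
  let x_min := -(PySem.Int.floordiv (PySem.List.pyGetD board 0 0) 2)
  let y_max := PySem.Int.floordiv (PySem.List.pyGetD board 1 0) 2
  let y_min := -(PySem.Int.floordiv (PySem.List.pyGetD board 1 0) 2)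
  let p := key_input.foldl (pvStepA x_max x_min y_max y_min) (0, 0)
  [p.1, p.2]

-- ===== PORT B =====
def pvClamp (lo hi v : Int) : Int := min hi (max lo v)

def pvStepX (lo hi : Int) (x : Int) (k : String) : Int :=
  if k = "right" then pvClamp lo hi (x + 1)
  else if k = "left" then pvClamp lo hi (x - 1)
  else x

def pvStepY (lo hi : Int) (y : Int) (k : String) : Int :=
  if k = "up" then pvClamp lo hi (y + 1)
  else if k = "down" then pvClamp lo hi (y - 1)
  else y

def solution_alt (key_input : List String) (board : List Int) : List Int :=
  let x_max := PySem.Int.floordiv (PySem.List.pyGetD board 0 0) 2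
  let x_min := -(PySem.Int.floordiv (PySem.List.pyGetD board 0 0) 2)
  let y_max := PySem.Int.floordiv (PySem.List.pyGetD board 1 0) 2
  let y_min := -(PySem.Int.floordiv (PySem.List.pyGetD board 1 0) 2)
  let x := key_input.foldl (pvStepX x_min x_max) 0
  let y := key_input.foldl (pvStepY y_min y_max) 0
  [x, y]

-- ===== PRECONDITION & SPEC =====
-- A raises IndexError (board[0] / board[1]) when board has fewer than two elements.
def Pre_solution (key_input : List String) (board : List Int) : Prop := 2 ≤ board.length
instance (key_input : List String) (board : List Int) : Decidable (Pre_solution key_input board) := by unfold Pre_solution; infer_instance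
def pvWitness_solution : List String × List Int := (["up", "left", "up"], [5, 4])

def Spec_solution (key_input : List String) (board : List Int) (out : List Int) : Prop := out = solution_alt key_input board
instance (key_input : List String) (board : List Int) (out : List Int) : Decidable (Spec_solution key_input board out) := by unfold Spec_solution; infer_instance

-- ===== CLAIM (what is proved, stated in full; the proofs are below) =====
def Claim_equal_solution : Prop := ∀ (key_input : List String) (board : List Int), Dom_solution key_input board → Pre_solution key_input board → Spec_solution key_input board (solution key_input board)

-- ===== LEMMAS AND PROOFS =====
lemma pvStepA_split (xmx xmn ymx ymn : Int) (p : Int × Int) (k : String) :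
    pvStepA xmx xmn ymx ymn p k = (pvStepX xmn xmx p.1 k, pvStepY ymn ymx p.2 k) := by
  unfold pvStepA pvStepX pvStepY pvClamp
  split_ifs <;> simp_all

lemma pvFold_split (xmx xmn ymx ymn : Int) (ks : List String) (x y : Int) :
    ks.foldl (pvStepA xmx xmn ymx ymn) (x, y) =
      (ks.foldl (pvStepX xmn xmx) x, ks.foldl (pvStepY ymn ymx) y) := by
  have h : (fun (p : Int × Int) k => pvStepA xmx xmn ymx ymn p k)
      = fun (p : Int × Int) k => (pvStepX xmn xmx p.1 k, pvStepY ymn ymx p.2 k) := by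
    funext p k; exact pvStepA_split xmx xmn ymx ymn p k
  calc ks.foldl (pvStepA xmx xmn ymx ymn) (x, y)
      = ks.foldl (fun (p : Int × Int) k => (pvStepX xmn xmx p.1 k, pvStepY ymn ymx p.2 k)) (x, y) := by rw [show pvStepA xmx xmn ymx ymn = _ from h]
    _ = (ks.foldl (pvStepX xmn xmx) x, ks.foldl (pvStepY ymn ymx) y) :=
        PySem.List.foldl_prod_mk _ _ _ _ _

-- ===== VERDICT (by name: the statement is the Claim_ definition above) =====
theorem solution_spec : Claim_equal_solution := by
  intro key_input board _ _
  unfold Spec_solution solution solution_alt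
  simp only [pvFold_split]
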